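-- pv_equiv track=rewrite | github.com/Vishu26/Dynamic-Programming | rodCutGivenSum.py | generate
-- ===== SOURCE A (Python) =====
-- def generate(a,n,su):
--     d =[[0]*(n+1) for i in range(n+1)]
--     for i in range(1,n+1):
--         for j in range(1,n+1):
--             if i==1:
--                 d[i][j]=[[a[i-1]*j,[i]*j]]
--             elif j<i:
--                 d[i][j]=d[i-1][j]
--             elif i==j:
--                 d[i][j]=[[a[i-1],[i]]]+d[i-1][j]
--             else:
--                 b=[]
--                 for p in d[i][j-i]:
--                     b.append([p[0]+a[i-1],p[1]+[i]])
--                 d[i][j]=b+d[i-1][j]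
--     for i in range(1,n+1):
--         for j in d[i][i]:
--         	if j[0]==su:
--         		yield j[1]
-- ===== SOURCE B (Python) =====
-- def generate(a, n, su):
--     # Same recurrence as the table version, evaluated top-down: a recursive
--     # d(i, j) memoized in a dict cache instead of filling an (n+1) x (n+1)
--     # table with nested loops.
--     cache = {}
--
--     def d(i, j):
--         if (i, j) in cache:
--             return cache[(i, j)]
--         if i == 1:
--             r = [[a[0] * j, [1] * j]]
--         elif j < i:
--             r = d(i - 1, j)
--         elif i == j:
--             r = [[a[i - 1], [i]]] + d(i - 1, j)
--         else:
--             r = [[p[0] + a[i - 1], p[1] + [i]] for p in d(i, j - i)] + d(i - 1, j)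
--         cache[(i, j)] = r
--         return r
--
--     for i in range(1, n + 1):
--         for part in d(i, i):
--             if part[0] == su:
--                 yield part[1]
-- ===== Notes on version B (the rewrite author's own statement) =====
-- stated objective: alternative
-- what changed: Replaces A's bottom-up (n+1)x(n+1) dynamic-programming table filled by nested i/j loops with a top-down recursive function d(i,j) (memoized in a dict) evaluating the same four-case recurrence on demand, only at the entries the output loop actually needs.
import Mathlib
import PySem

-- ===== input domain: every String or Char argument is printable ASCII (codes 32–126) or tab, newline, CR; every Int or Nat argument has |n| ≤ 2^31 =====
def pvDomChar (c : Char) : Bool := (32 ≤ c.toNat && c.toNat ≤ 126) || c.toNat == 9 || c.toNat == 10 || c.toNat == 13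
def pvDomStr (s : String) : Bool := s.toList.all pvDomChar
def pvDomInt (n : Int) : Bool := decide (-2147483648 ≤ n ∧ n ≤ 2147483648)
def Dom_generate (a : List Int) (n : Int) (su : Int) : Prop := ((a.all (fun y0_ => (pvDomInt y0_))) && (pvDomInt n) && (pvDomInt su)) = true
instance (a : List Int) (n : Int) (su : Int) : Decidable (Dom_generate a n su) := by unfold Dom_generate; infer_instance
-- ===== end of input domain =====

-- B replaces A's bottom-up (n+1)×(n+1) table filled by nested loops with a
-- top-down memoized recursive evaluation of the same recurrence (objective: alternative).

-- ===== PORT A =====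
-- Python's heterogeneous pair [sum, partition] is ported as Int × List Int.
-- The 2-D list d is ported as a finite map keyed by (i, j); this is exact because
-- the 0 placeholders of the initial table are never read before being overwritten.
-- a[i-1] is ported as (pyGet? …).getD 0; Pre_generate excludes the IndexError inputs.
def pvCellA (a : List Int) (d : PySem.Dict (Int × Int) (List (Int × List Int)))
    (i j : Int) : List (Int × List Int) :=
  if i == 1 then
    [((PySem.List.pyGet? a (i-1)).getD 0 * j, List.replicate j.toNat i)]
  else if j < i then
    d.getD (i-1, j) []
  else if i == j then
    ((PySem.List.pyGet? a (i-1)).getD 0, [i]) :: d.getD (i-1, j) []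
  else
    ((d.getD (i, j-i) []).foldl
      (fun b p => b ++ [(p.1 + (PySem.List.pyGet? a (i-1)).getD 0, p.2 ++ [i])]) [])
      ++ d.getD (i-1, j) []

def pvFillA (a : List Int) (n : Int) : PySem.Dict (Int × Int) (List (Int × List Int)) :=
  (PySem.List.pyRange 1 (n+1) 1).foldl (fun d i =>
    (PySem.List.pyRange 1 (n+1) 1).foldl (fun d j => d.insert (i, j) (pvCellA a d i j)) d)
    PySem.Dict.empty

def generate (a : List Int) (n : Int) (su : Int) : List (List Int) :=
  let d := pvFillA a n
  (PySem.List.pyRange 1 (n+1) 1).foldl (fun out i =>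
    (d.getD (i, i) []).foldl (fun out p => if p.1 == su then out ++ [p.2] else out) out) []

-- ===== PORT B =====
-- Source B's inner recursive d(i, j); arguments are the (always ≥ 1) loop indices,
-- carried as Nat.  The i = 0 pattern is only a totality guard: Source B never calls
-- d with i < 1 (d(i-1, j) is guarded by i ≠ 1).  Source B's dict cache only memoizes
-- this pure recursion (same cases, same values); the port evaluates the
-- recursion directly, without the value-preserving cache bookkeeping.
def pvDRec (a : List Int) : Nat → Nat → List (Int × List Int)
  | 0, _ => []
  | 1, j => [((PySem.List.pyGet? a 0).getD 0 * (j : Int), List.replicate j (1 : Int))]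
  | (i+2), j =>
    if _h : j < i + 2 then
      pvDRec a (i+1) j
    else if _h2 : i + 2 = j then
      ((PySem.List.pyGet? a ((i:Int)+1)).getD 0, [(i:Int)+2]) :: pvDRec a (i+1) j
    else
      ((pvDRec a (i+2) (j-(i+2))).map
        (fun p => (p.1 + (PySem.List.pyGet? a ((i:Int)+1)).getD 0, p.2 ++ [(i:Int)+2])))
        ++ pvDRec a (i+1) j
termination_by i j => i + j
decreasing_by all_goals omega

def generate_alt (a : List Int) (n : Int) (su : Int) : List (List Int) :=
  (PySem.List.pyRange 1 (n+1) 1).foldl (fun out i =>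
    (pvDRec a i.toNat i.toNat).foldl
      (fun out p => if p.1 == su then out ++ [p.2] else out) out) []

-- ===== PRECONDITION & SPEC =====
-- Pre_ excludes exactly the inputs where Python A raises IndexError: for n ≥ 1
-- every a[i-1], i = 1..n, is read, so the list must have at least n elements.
def Pre_generate (a : List Int) (n : Int) (su : Int) : Prop := 1 ≤ n → n ≤ (a.length : Int)
instance (a : List Int) (n : Int) (su : Int) : Decidable (Pre_generate a n su) := by
  unfold Pre_generate; infer_instance

def pvWitness_generate : List Int × Int × Int := ([1, 2, 3], 3, 3)

def Spec_generate (a : List Int) (n : Int) (su : Int) (out : List (List Int)) : Prop :=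
  out = generate_alt a n su
instance (a : List Int) (n : Int) (su : Int) (out : List (List Int)) :
    Decidable (Spec_generate a n su out) := by unfold Spec_generate; infer_instance

-- ===== CLAIM (what is proved, stated in full; the proofs are below) =====
def Claim_equal_generate : Prop := ∀ (a : List Int) (n : Int) (su : Int),
  Dom_generate a n su → Pre_generate a n su → Spec_generate a n su (generate a n su)

-- ===== LEMMAS AND PROOFS =====

-- One cell of A's table equals the recursive value, given that row i-1 is correct
-- (for i = 1 this reads row 0, whose getD default [] is pvDRec a 0 _) and the
-- already-filled prefix of row i is correct.
theorem pvCellA_correct (a : List Int) (N i j : Int)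
    (d : PySem.Dict (Int × Int) (List (Int × List Int)))
    (hi : 1 ≤ i) (hj : 1 ≤ j) (hjN : j ≤ N)
    (hprev : ∀ j', 1 ≤ j' → j' ≤ N → d.getD (i-1, j') [] = pvDRec a (i-1).toNat j'.toNat)
    (hcur : ∀ j', 1 ≤ j' → j' < j → d.getD (i, j') [] = pvDRec a i.toNat j'.toNat) :
    pvCellA a d i j = pvDRec a i.toNat j.toNat := by
  unfold pvCellA
  by_cases h1 : i = 1
  · subst h1
    have hjt : ((j.toNat : Int)) = j := by omega
    simp only [beq_self_eq_true, if_true, Int.toNat_one, pvDRec, hjt]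
    norm_num
  · obtain ⟨k, hk⟩ : ∃ k, i.toNat = k + 2 := ⟨i.toNat - 2, by omega⟩
    have hne : (i == 1) = false := by simp [h1]
    rw [hne, if_neg (by simp)]
    rw [hk]
    by_cases h2 : j < i
    · rw [if_pos h2]
      rw [pvDRec, dif_pos (by omega)]
      rw [hprev j hj hjN]
      congr 1
      omega
    · rw [if_neg h2]
      by_cases h3 : i = j
      · rw [if_pos (by simp [h3])]
        rw [pvDRec, dif_neg (by omega), dif_pos (by omega)]
        rw [hprev j hj hjN]
        have e1 : i - 1 = ((k : Int) + 1) := by omega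
        have e2 : i = ((k : Int) + 2) := by omega
        have e3 : ((k : Int) + 1).toNat = k + 1 := by omega
        rw [e1, e2, e3]
      · rw [if_neg (by simp [h3])]
        rw [pvDRec, dif_neg (by omega), dif_neg (by omega)]
        have hji : i < j := by omega
        rw [hprev j hj hjN]
        rw [hcur (j - i) (by omega) (by omega)]
        rw [PySem.List.foldl_append_singleton_eq_map, List.nil_append]
        have e1 : i - 1 = ((k : Int) + 1) := by omega
        have e2 : i = ((k : Int) + 2) := by omega
        have e3 : ((k : Int) + 1).toNat = k + 1 := by omega
        have e4 : ((k : Int) + 2).toNat = k + 2 := by omega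
        have e5 : (j - ((k : Int) + 2)).toNat = j.toNat - (k + 2) := by omega
        rw [e1, e2, e3, e4, e5]

-- Filling row i left to right: keys of other rows are untouched, and afterwards
-- every cell (i, j'), 1 ≤ j' ≤ N, holds the recursive value.
theorem pvFillRow_correct (a : List Int) (N i : Int) (hi : 1 ≤ i) :
    ∀ (fuel : Nat) (j0 : Int) (d : PySem.Dict (Int × Int) (List (Int × List Int))),
    (N + 1 - j0).toNat = fuel → 1 ≤ j0 →
    (∀ j', 1 ≤ j' → j' ≤ N → d.getD (i-1, j') [] = pvDRec a (i-1).toNat j'.toNat) →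
    (∀ j', 1 ≤ j' → j' < j0 → d.getD (i, j') [] = pvDRec a i.toNat j'.toNat) →
    (∀ k, k.1 ≠ i →
      ((PySem.List.pyRange j0 (N+1) 1).foldl
        (fun d j => d.insert (i, j) (pvCellA a d i j)) d).getD k [] = d.getD k []) ∧
    (∀ j', 1 ≤ j' → j' ≤ N →
      ((PySem.List.pyRange j0 (N+1) 1).foldl
        (fun d j => d.insert (i, j) (pvCellA a d i j)) d).getD (i, j') []
        = pvDRec a i.toNat j'.toNat) := by
  intro fuel
  induction fuel with
  | zero =>
    intro j0 d hfuel hj0 hprev hcur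
    rw [PySem.List.pyRange_one_eq_nil (by omega)]
    simp only [List.foldl_nil]
    exact ⟨fun k _ => trivial, fun j' h1 h2 => hcur j' h1 (by omega)⟩
  | succ f ih =>
    intro j0 d hfuel hj0 hprev hcur
    rw [PySem.List.pyRange_one_cons (by omega : j0 < N + 1)]
    simp only [List.foldl_cons]
    have hprev1 : ∀ j', 1 ≤ j' → j' ≤ N →
        (d.insert (i, j0) (pvCellA a d i j0)).getD (i-1, j') [] = pvDRec a (i-1).toNat j'.toNat := by
      intro j' h1 h2
      rw [PySem.Dict.getD_insert, if_neg (by intro h; rw [Prod.mk.injEq] at h; omega)]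
      exact hprev j' h1 h2
    have hcur1 : ∀ j', 1 ≤ j' → j' < j0 + 1 →
        (d.insert (i, j0) (pvCellA a d i j0)).getD (i, j') [] = pvDRec a i.toNat j'.toNat := by
      intro j' h1 h2
      by_cases hj : j' = j0
      · subst hj
        rw [PySem.Dict.getD_insert, if_pos rfl]
        exact pvCellA_correct a N i j' d hi h1 (by omega) hprev hcur
      · rw [PySem.Dict.getD_insert, if_neg (by intro h; rw [Prod.mk.injEq] at h; omega)]
        exact hcur j' h1 (by omega)
    obtain ⟨P1, P2⟩ := ih (j0 + 1) (d.insert (i, j0) (pvCellA a d i j0)) (by omega) (by omega) hprev1 hcur1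
    refine ⟨fun k hk => ?_, P2⟩
    rw [P1 k hk, PySem.Dict.getD_insert, if_neg (fun h => hk (by rw [h]))]

-- Filling rows i0..N: afterwards every cell (i', j') with 0 ≤ i', 1 ≤ j' ≤ N
-- (rows below i0 assumed correct already) holds the recursive value.
theorem pvFillAll_correct (a : List Int) (N : Int) :
    ∀ (fuel : Nat) (i0 : Int) (d : PySem.Dict (Int × Int) (List (Int × List Int))),
    (N + 1 - i0).toNat = fuel → 1 ≤ i0 →
    (∀ i' j', 0 ≤ i' → i' < i0 → 1 ≤ j' → j' ≤ N →
      d.getD (i', j') [] = pvDRec a i'.toNat j'.toNat) →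
    (∀ i' j', 0 ≤ i' → 1 ≤ j' → j' ≤ N → (i' < i0 ∨ i' ≤ N) →
      ((PySem.List.pyRange i0 (N+1) 1).foldl (fun d i =>
        (PySem.List.pyRange 1 (N+1) 1).foldl
          (fun d j => d.insert (i, j) (pvCellA a d i j)) d) d).getD (i', j') []
        = pvDRec a i'.toNat j'.toNat) := by
  intro fuel
  induction fuel with
  | zero =>
    intro i0 d hfuel hi0 hrows
    rw [show PySem.List.pyRange i0 (N+1) 1 = [] from PySem.List.pyRange_one_eq_nil (by omega)]
    simp only [List.foldl_nil]
    intro i' j' h0 h1 h2 h3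
    exact hrows i' j' h0 (by omega) h1 h2
  | succ f ih =>
    intro i0 d hfuel hi0 hrows
    rw [PySem.List.pyRange_one_cons (by omega : i0 < N + 1)]
    simp only [List.foldl_cons]
    obtain ⟨P1, P2⟩ := pvFillRow_correct a N i0 hi0 (N + 1 - 1).toNat 1 d rfl (by omega)
      (fun j' h1 h2 => hrows (i0 - 1) j' (by omega) (by omega) h1 h2)
      (fun j' h1 h2 => by omega)
    intro i' j' h0 h1 h2 h3
    refine ih (i0 + 1) _ (by omega) (by omega) ?_ i' j' h0 h1 h2 (by omega)
    intro i'' j'' g0 g1 g2 g3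
    by_cases hii : i'' = i0
    · subst hii
      exact P2 j'' g2 g3
    · rw [P1 (i'', j'') (by simpa using hii)]
      exact hrows i'' j'' g0 (by omega) g2 g3

theorem pvFillA_correct (a : List Int) (n i j : Int) (hi : 1 ≤ i) (hiN : i ≤ n)
    (hj : 1 ≤ j) (hjN : j ≤ n) :
    (pvFillA a n).getD (i, j) [] = pvDRec a i.toNat j.toNat := by
  unfold pvFillA
  apply pvFillAll_correct a n (n + 1 - 1).toNat 1 PySem.Dict.empty rfl (by omega)
    (fun i' j' h0 h1 h2 h3 => by
      have : i' = 0 := by omega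
      subst this
      rw [PySem.Dict.getD_empty]
      simp [pvDRec])
    i j (by omega) hj hjN (Or.inr hiN)

-- ===== VERDICT (by name: the statement is the Claim_ definition above) =====
theorem generate_spec : Claim_equal_generate := by
  intro a n su _ _
  unfold Spec_generate generate generate_alt
  apply PySem.List.foldl_congr_mem
  intro acc i hi
  rw [PySem.List.mem_pyRange_one] at hi
  rw [pvFillA_correct a n i i (by omega) (by omega) (by omega) (by omega)]
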